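-- pv_equiv track=rewrite | github.com/JGCdev/gta-fivem-texture-optimizer | batch_optimize.py | encode_rsc7_flags
-- ===== SOURCE A (Python) =====
-- def encode_rsc7_flags(virtual_size, physical_size):
--     """Codifica flags RSC7 para los tamaños dados."""
--     def encode(size):
--         if size == 0:
--             return 0
--         pages = (size + 0xFFF) // 0x1000
--         shift = 0
--         while (1 << (shift + 1)) <= pages:
--             shift += 1
--         base = 1 << shift
--         extra = pages - base
--         mult = min(extra, 127)
--         return (shift << 4) | (mult << 17)
--
--     f0 = encode(virtual_size)
--     f1 = encode(physical_size)
--     if physical_size > 0: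
--         f1 |= 0x80
--     return f0, f1
-- ===== SOURCE B (Python) =====
-- def encode_rsc7_flags(virtual_size, physical_size):
--     """Codifica flags RSC7 para los tamanos dados (closed-form floor-log2)."""
--     def encode(size):
--         if size == 0:
--             return 0
--         pages = (size + 0xFFF) >> 12
--         shift = max(pages, 1).bit_length() - 1
--         return (shift << 4) | (min(pages - (1 << shift), 127) << 17)
--
--     f1 = encode(physical_size)
--     return encode(virtual_size), (f1 | 0x80) if physical_size > 0 else f1
-- ===== Notes on version B (the rewrite author's own statement) =====
-- stated objective: idiomatic
-- what changed: Replaces the iterative while-loop search for the largest shift with 2^(shift+1) <= pages by the closed form bit_length()-1 (clamped at pages>=1 so it is total where the loop trivially stays at 0), and uses a shift instead of the page floor-division.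
import Mathlib
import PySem

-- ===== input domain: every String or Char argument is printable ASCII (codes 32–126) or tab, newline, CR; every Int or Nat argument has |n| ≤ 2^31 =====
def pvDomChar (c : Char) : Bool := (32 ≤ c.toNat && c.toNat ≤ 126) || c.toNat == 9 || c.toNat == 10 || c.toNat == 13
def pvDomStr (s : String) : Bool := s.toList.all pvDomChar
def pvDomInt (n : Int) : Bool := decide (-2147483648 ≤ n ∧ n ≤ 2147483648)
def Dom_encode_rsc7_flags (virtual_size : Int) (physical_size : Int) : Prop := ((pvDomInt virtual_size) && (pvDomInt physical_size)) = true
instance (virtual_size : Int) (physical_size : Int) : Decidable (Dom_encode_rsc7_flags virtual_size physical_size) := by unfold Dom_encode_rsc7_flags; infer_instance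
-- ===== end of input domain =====

-- B replaces A's while-loop search for the largest shift with 2^(shift+1) <= pages by the
-- closed form bit_length()-1 (clamped at pages >= 1, where A's loop trivially stays at 0).

-- ===== PORT A =====
-- the 'while (1 << (shift + 1)) <= pages: shift += 1' loop of A's inner encode
def pvLoopA (pages : Int) (shift : Nat) : Nat :=
  if (1 : Int) <<< (shift + 1) ≤ pages then pvLoopA pages (shift + 1) else shift
termination_by pages.toNat - shift
decreasing_by
  rename_i h
  have h1 : (1 : Int) <<< (shift + 1) = 2 ^ (shift + 1) := by
    simp [Int.shiftLeft_eq]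
  have h2 : (shift : Int) + 1 < 2 ^ (shift + 1) := by
    exact_mod_cast Nat.lt_two_pow_self (n := shift + 1)
  omega

-- inner 'def encode(size)' of A
def pvEncodeA (size : Int) : Int :=
  if size = 0 then 0
  else
    let pages := PySem.Int.floordiv (size + 0xFFF) 0x1000
    let shift := pvLoopA pages 0
    let base : Int := (1 : Int) <<< shift
    let extra := pages - base
    let mult := min extra 127
    PySem.Int.bor ((shift : Int) <<< 4) (mult <<< 17)

def encode_rsc7_flags (virtual_size : Int) (physical_size : Int) : Int × Int :=
  let f0 := pvEncodeA virtual_size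
  let f1 := pvEncodeA physical_size
  let f1 := if physical_size > 0 then PySem.Int.bor f1 0x80 else f1
  (f0, f1)

-- ===== PORT B =====
-- inner 'def encode(size)' of B
def pvEncodeB (size : Int) : Int :=
  if size = 0 then 0
  else
    let pages := (size + 0xFFF) >>> 12
    let shift := PySem.Int.bitLength (max pages 1) - 1
    PySem.Int.bor ((shift : Int) <<< 4) ((min (pages - (1 : Int) <<< shift) 127) <<< 17)

def encode_rsc7_flags_alt (virtual_size : Int) (physical_size : Int) : Int × Int :=
  let f1 := pvEncodeB physical_size
  (pvEncodeB virtual_size, if physical_size > 0 then PySem.Int.bor f1 0x80 else f1)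

-- ===== PRECONDITION & SPEC =====
def Spec_encode_rsc7_flags (virtual_size : Int) (physical_size : Int) (out : Int × Int) : Prop := out = encode_rsc7_flags_alt virtual_size physical_size
instance (virtual_size : Int) (physical_size : Int) (out : Int × Int) : Decidable (Spec_encode_rsc7_flags virtual_size physical_size out) := by unfold Spec_encode_rsc7_flags; infer_instance

-- ===== CLAIM (what is proved, stated in full; the proofs are below) =====
def Claim_equal_encode_rsc7_flags : Prop := ∀ (virtual_size : Int) (physical_size : Int), Dom_encode_rsc7_flags virtual_size physical_size → Spec_encode_rsc7_flags virtual_size physical_size (encode_rsc7_flags virtual_size physical_size)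

-- ===== LEMMAS AND PROOFS =====

-- arithmetic right shift by 12 is floor division by 4096 (Python's '//')
theorem pv_shiftRight12 (a : Int) : a >>> 12 = PySem.Int.floordiv a 4096 := by
  cases a with
  | ofNat n =>
      cases n with
      | zero => rfl
      | succ m =>
          show Int.ofNat ((m + 1) >>> 12) = _
          simp [PySem.Int.floordiv, Int.fdiv, Nat.shiftRight_eq_div_pow]
  | negSucc n =>
      show Int.negSucc (n >>> 12) = _
      simp [PySem.Int.floordiv, Int.fdiv, Nat.shiftRight_eq_div_pow]

-- A's loop computes bitLength - 1 whenever 2^shift ≤ pages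
theorem pvLoopA_eq (pages : Int) (shift : Nat) (h : (2 : Int) ^ shift ≤ pages) :
    pvLoopA pages shift = PySem.Int.bitLength pages - 1 := by
  rw [pvLoopA]
  split
  · rename_i hlt
    rw [Int.shiftLeft_eq, one_mul] at hlt
    exact pvLoopA_eq pages (shift + 1) hlt
  · rename_i hge
    rw [Int.shiftLeft_eq, one_mul, not_le] at hge
    have hpos : 0 < pages := lt_of_lt_of_le (by positivity) h
    have hnat : ((pages.natAbs : Int)) = pages := Int.natAbs_of_nonneg hpos.le
    have hA : 2 ^ shift ≤ pages.natAbs := by exact_mod_cast h.trans_eq hnat.symm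
    have hB : pages.natAbs < 2 ^ (shift + 1) := by exact_mod_cast hnat.symm ▸ hge
    have hb2 : pages.natAbs < 2 ^ PySem.Int.bitLength pages := PySem.Int.lt_two_pow_bitLength pages
    have hb1 : 2 ^ (PySem.Int.bitLength pages - 1) ≤ pages.natAbs :=
      PySem.Int.two_pow_bitLength_le pages (by omega)
    have h1 : shift < PySem.Int.bitLength pages := by
      by_contra hc
      push Not at hc
      exact absurd (le_trans (Nat.pow_le_pow_right (by norm_num) hc) hA) (not_le.mpr hb2)
    have h2 : PySem.Int.bitLength pages - 1 ≤ shift := by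
      by_contra hc
      push Not at hc
      exact absurd
        (le_trans (Nat.pow_le_pow_right (by norm_num) (by omega : shift + 1 ≤ PySem.Int.bitLength pages - 1)) hb1)
        (not_le.mpr hB)
    omega
termination_by pages.toNat - shift
decreasing_by
  rename_i hlt
  rw [Int.shiftLeft_eq, one_mul] at hlt
  have h2 : (shift : Int) + 1 < 2 ^ (shift + 1) := by
    exact_mod_cast Nat.lt_two_pow_self (n := shift + 1)
  omega

theorem pvEncode_eq (size : Int) : pvEncodeA size = pvEncodeB size := by
  unfold pvEncodeA pvEncodeB
  by_cases h0 : size = 0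
  · simp [h0]
  · simp only [h0, if_false]
    rw [pv_shiftRight12]
    set pages := PySem.Int.floordiv (size + 0xFFF) 0x1000 with hp
    have : pvLoopA pages 0 = PySem.Int.bitLength (max pages 1) - 1 := by
      by_cases hpos : 1 ≤ pages
      · rw [max_eq_left hpos]
        exact pvLoopA_eq pages 0 (by simpa using hpos)
      · have h2 : (1 : Int) <<< ((0 : Nat) + 1) = 2 := by decide
        rw [pvLoopA, h2, if_neg (by omega), max_eq_right (by omega : pages ≤ 1)]
        decide
    rw [this]

-- ===== VERDICT (by name: the statement is the Claim_ definition above) =====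
theorem encode_rsc7_flags_spec : Claim_equal_encode_rsc7_flags := by
  intro v p _
  unfold Spec_encode_rsc7_flags encode_rsc7_flags encode_rsc7_flags_alt
  simp [pvEncode_eq]
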